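-- pv_equiv track=rewrite | github.com/Samrud-Reddy/ASK-ai | converter.py | format_pytessaract_obj
-- ===== SOURCE A (Python) =====
-- def format_pytessaract_obj(five_dimensional_list: list, delimiters = ["\n\n----\n\n", "\n\n\n", "\n\n", "\n", " "]):
--     """Formats the 5 dimesional list returned by stringify_page
--
--         Args:
--             five_dimensional_list: 5 dimesional list of pages[blocks[para[lines[words[]]]]]
--             delimiters: the seperators in order pages, blocks, lines, words
--     """
--     result = ""
--     for i, dim1 in enumerate(five_dimensional_list):
--         for j, dim2 in enumerate(dim1):
--             for k, dim3 in enumerate(dim2):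
--                 for l, dim4 in enumerate(dim3):
--                     for m, word in enumerate(dim4):
--                         result += word
--                         if m < len(dim4) - 1:
--                             result += delimiters[4]
--                     if l < len(dim3) - 1:
--                         result += delimiters[3]
--                 if k < len(dim2) - 1:
--                     result += delimiters[2]
--             if j < len(dim1) - 1:
--                 result += delimiters[1]
--         if i < len(five_dimensional_list) - 1:
--             result += delimiters[0]
--     return result
-- ===== SOURCE B (Python) =====
-- def format_pytessaract_obj(five_dimensional_list: list, delimiters = ["\n\n----\n\n", "\n\n\n", "\n\n", "\n", " "]):
--     """Formats the 5 dimesional list returned by stringify_page (nested-join version)."""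
--     def join_level(parts, depth):
--         # a separator (and hence delimiters[depth]) is only needed between two elements
--         if not parts:
--             return ""
--         if len(parts) == 1:
--             return parts[0]
--         return delimiters[depth].join(parts)
--
--     return join_level(
--         [join_level(
--             [join_level(
--                 [join_level(
--                     [join_level(line, 4) for line in para],
--                     3) for para in block],
--                 2) for block in page],
--             1) for page in five_dimensional_list],
--         0)
-- ===== Notes on version B (the rewrite author's own statement) =====
-- stated objective: idiomatic
-- what changed: Replaces the five nested index-guarded accumulation loops (result += word; if idx < len-1: result += delim) by nested str.join calls, one per depth level, built with comprehensions; join emits the separators between elements, so all manual boundary checks disappear.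
import Mathlib
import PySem

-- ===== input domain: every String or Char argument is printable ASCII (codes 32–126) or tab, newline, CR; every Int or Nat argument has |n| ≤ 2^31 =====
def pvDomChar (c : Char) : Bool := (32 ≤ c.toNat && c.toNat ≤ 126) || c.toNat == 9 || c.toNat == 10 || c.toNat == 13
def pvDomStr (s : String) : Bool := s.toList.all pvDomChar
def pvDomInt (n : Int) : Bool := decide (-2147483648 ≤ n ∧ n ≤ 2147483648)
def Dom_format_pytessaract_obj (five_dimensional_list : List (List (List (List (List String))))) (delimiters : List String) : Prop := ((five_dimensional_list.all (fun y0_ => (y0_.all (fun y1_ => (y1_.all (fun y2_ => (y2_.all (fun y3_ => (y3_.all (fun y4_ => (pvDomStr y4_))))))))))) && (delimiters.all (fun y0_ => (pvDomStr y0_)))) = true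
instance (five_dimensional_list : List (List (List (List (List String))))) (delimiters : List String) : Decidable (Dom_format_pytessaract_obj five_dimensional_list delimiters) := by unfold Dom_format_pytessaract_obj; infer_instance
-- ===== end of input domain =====

-- B replaces A's five index-guarded accumulation loops by nested joins (one per depth), idiomatic and same cost.


-- ===== PORT A =====
-- literal transliteration of A's five nested enumerate-loops with index-guarded separator appends;
-- delimiters[k] is PySem.List.pyGetD (Pre_ guarantees the guarded accesses are in range)
def format_pytessaract_obj (five_dimensional_list : List (List (List (List (List String))))) (delimiters : List String) : String :=
  (PySem.List.enumerate five_dimensional_list).foldl (fun result p =>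
    let result :=
      (PySem.List.enumerate p.2).foldl (fun result q =>
        let result :=
          (PySem.List.enumerate q.2).foldl (fun result r =>
            let result :=
              (PySem.List.enumerate r.2).foldl (fun result s =>
                let result :=
                  (PySem.List.enumerate s.2).foldl (fun result t =>
                    let result := result ++ t.2
                    if t.1 < (s.2.length : Int) - 1 then result ++ PySem.List.pyGetD delimiters 4 "" else result) result
                if s.1 < (r.2.length : Int) - 1 then result ++ PySem.List.pyGetD delimiters 3 "" else result) result
            if r.1 < (q.2.length : Int) - 1 then result ++ PySem.List.pyGetD delimiters 2 "" else result) result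
        if q.1 < (p.2.length : Int) - 1 then result ++ PySem.List.pyGetD delimiters 1 "" else result) result
    if p.1 < (five_dimensional_list.length : Int) - 1 then result ++ PySem.List.pyGetD delimiters 0 "" else result) ""

-- ===== PORT B =====
-- Source B's join_level: "" / the single element / delimiters[depth].join(parts)
def joinLevel (delimiters : List String) (parts : List String) (depth : Int) : String :=
  match parts with
  | [] => ""
  | [p] => p
  | _ => PySem.Str.join (PySem.List.pyGetD delimiters depth "") parts

def format_pytessaract_obj_alt (five_dimensional_list : List (List (List (List (List String))))) (delimiters : List String) : String :=
  joinLevel delimiters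
    (five_dimensional_list.map (fun page =>
      joinLevel delimiters
        (page.map (fun block =>
          joinLevel delimiters
            (block.map (fun para =>
              joinLevel delimiters
                (para.map (fun line => joinLevel delimiters line 4))
                3))
            2))
        1))
    0

-- ===== PRECONDITION & SPEC =====
-- Pre_ holds exactly where Python A returns: A reads delimiters[k] only when some level-k node
-- has ≥ 2 children (an IndexError otherwise); B raises on exactly the same inputs.
def Pre_format_pytessaract_obj (five_dimensional_list : List (List (List (List (List String))))) (delimiters : List String) : Prop :=
  (1 < five_dimensional_list.length → 1 ≤ delimiters.length) ∧
  ((∃ p ∈ five_dimensional_list, 1 < p.length) → 2 ≤ delimiters.length) ∧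
  ((∃ p ∈ five_dimensional_list, ∃ b ∈ p, 1 < b.length) → 3 ≤ delimiters.length) ∧
  ((∃ p ∈ five_dimensional_list, ∃ b ∈ p, ∃ q ∈ b, 1 < q.length) → 4 ≤ delimiters.length) ∧
  ((∃ p ∈ five_dimensional_list, ∃ b ∈ p, ∃ q ∈ b, ∃ l ∈ q, 1 < l.length) → 5 ≤ delimiters.length)
instance (five_dimensional_list : List (List (List (List (List String))))) (delimiters : List String) : Decidable (Pre_format_pytessaract_obj five_dimensional_list delimiters) := by unfold Pre_format_pytessaract_obj; infer_instance

def pvWitness_format_pytessaract_obj : List (List (List (List (List String)))) × List String :=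
  ([[[[["hello", "world"], ["foo"]]]], [[[["x"]]]]], ["\n\n----\n\n", "\n\n\n", "\n\n", "\n", " "])

def Spec_format_pytessaract_obj (five_dimensional_list : List (List (List (List (List String))))) (delimiters : List String) (out : String) : Prop := out = format_pytessaract_obj_alt five_dimensional_list delimiters
instance (five_dimensional_list : List (List (List (List (List String))))) (delimiters : List String) (out : String) : Decidable (Spec_format_pytessaract_obj five_dimensional_list delimiters out) := by unfold Spec_format_pytessaract_obj; infer_instance

-- ===== CLAIM (what is proved, stated in full; the proofs are below) =====
def Claim_equal_format_pytessaract_obj : Prop := ∀ (five_dimensional_list : List (List (List (List (List String))))) (delimiters : List String), Dom_format_pytessaract_obj five_dimensional_list delimiters → Pre_format_pytessaract_obj five_dimensional_list delimiters → Spec_format_pytessaract_obj five_dimensional_list delimiters (format_pytessaract_obj five_dimensional_list delimiters)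

-- ===== LEMMAS AND PROOFS =====

theorem strJoin_nil (sep : String) : PySem.Str.join sep [] = "" :=
  String.toList_inj.mp (by simp [PySem.Str.toList_join, PySem.Chars.join_nil])

theorem strJoin_singleton (sep p : String) : PySem.Str.join sep [p] = p :=
  String.toList_inj.mp (by simp [PySem.Str.toList_join, PySem.Chars.join_singleton])

theorem strJoin_cons_cons (sep p q : String) (rest : List String) :
    PySem.Str.join sep (p :: q :: rest) = p ++ sep ++ PySem.Str.join sep (q :: rest) :=
  String.toList_inj.mp (by simp [PySem.Str.toList_join, PySem.Chars.join_cons_cons])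

theorem joinLevel_eq (delimiters : List String) (parts : List String) (depth : Int) :
    joinLevel delimiters parts depth = PySem.Str.join (PySem.List.pyGetD delimiters depth "") parts := by
  match parts with
  | [] => simp [joinLevel, strJoin_nil]
  | [p] => simp [joinLevel, strJoin_singleton]
  | p :: q :: rest => rfl

-- A's loop shape at one level: index-guarded separator appends equal `acc ++ join sep (map h xs)`
-- provided each body step is a pure append (hg) and the fold runs over enumerate xs s with s + |xs| = n.
theorem loopA_eq {α : Type} (g : String → α → String) (h : α → String)
    (hg : ∀ r x, g r x = r ++ h x) (sep : String) :
    ∀ (xs : List α) (s : Int) (acc : String) (n : Int), s + xs.length = n →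
      (PySem.List.enumerate xs s).foldl
        (fun result p => let result := g result p.2;
          if p.1 < n - 1 then result ++ sep else result) acc
      = acc ++ PySem.Str.join sep (xs.map h) := by
  intro xs
  induction xs with
  | nil =>
    intro s acc n _
    simp [PySem.List.enumerate_nil, strJoin_nil]
  | cons x rest ih =>
    intro s acc n hn
    rw [PySem.List.enumerate_cons]
    simp only [List.foldl_cons]
    cases rest with
    | nil =>
      have hcond : ¬ (s < n - 1) := by simp at hn; omega
      simp [PySem.List.enumerate_nil, hcond, hg, strJoin_singleton]
    | cons y t =>
      have hcond : s < n - 1 := by simp at hn; omega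
      have step := ih (s + 1) (g acc x ++ sep) n (by simp at hn ⊢; omega)
      simp only [hcond, if_pos]
      rw [step, hg]
      simp only [List.map_cons]
      rw [strJoin_cons_cons]
      simp [String.append_assoc]

theorem ports_agree (L : List (List (List (List (List String))))) (D : List String) :
    format_pytessaract_obj L D = format_pytessaract_obj_alt L D := by
  have h4 : ∀ (acc : String) (line : List String),
      (PySem.List.enumerate line).foldl (fun result t =>
        let result := result ++ t.2
        if t.1 < (line.length : Int) - 1 then result ++ PySem.List.pyGetD D 4 "" else result) acc
      = acc ++ PySem.Str.join (PySem.List.pyGetD D 4 "") (line.map id) :=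
    fun acc line => loopA_eq (fun r w => r ++ w) id (fun _ _ => rfl) _ line 0 acc line.length (by simp)
  have h3 : ∀ (acc : String) (para : List (List String)),
      (PySem.List.enumerate para).foldl (fun result s =>
        let result :=
          (PySem.List.enumerate s.2).foldl (fun result t =>
            let result := result ++ t.2
            if t.1 < (s.2.length : Int) - 1 then result ++ PySem.List.pyGetD D 4 "" else result) result
        if s.1 < (para.length : Int) - 1 then result ++ PySem.List.pyGetD D 3 "" else result) acc
      = acc ++ PySem.Str.join (PySem.List.pyGetD D 3 "")
          (para.map (fun line => PySem.Str.join (PySem.List.pyGetD D 4 "") (line.map id))) :=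
    fun acc para => loopA_eq _ _ (fun r line => h4 r line) _ para 0 acc para.length (by simp)
  have h2 : ∀ (acc : String) (block : List (List (List String))),
      (PySem.List.enumerate block).foldl (fun result r =>
        let result :=
          (PySem.List.enumerate r.2).foldl (fun result s =>
            let result :=
              (PySem.List.enumerate s.2).foldl (fun result t =>
                let result := result ++ t.2
                if t.1 < (s.2.length : Int) - 1 then result ++ PySem.List.pyGetD D 4 "" else result) result
            if s.1 < (r.2.length : Int) - 1 then result ++ PySem.List.pyGetD D 3 "" else result) result
        if r.1 < (block.length : Int) - 1 then result ++ PySem.List.pyGetD D 2 "" else result) acc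
      = acc ++ PySem.Str.join (PySem.List.pyGetD D 2 "")
          (block.map (fun para => PySem.Str.join (PySem.List.pyGetD D 3 "")
            (para.map (fun line => PySem.Str.join (PySem.List.pyGetD D 4 "") (line.map id))))) :=
    fun acc block => loopA_eq _ _ (fun r para => h3 r para) _ block 0 acc block.length (by simp)
  have h1 : ∀ (acc : String) (page : List (List (List (List String)))),
      (PySem.List.enumerate page).foldl (fun result q =>
        let result :=
          (PySem.List.enumerate q.2).foldl (fun result r =>
            let result :=
              (PySem.List.enumerate r.2).foldl (fun result s =>
                let result :=
                  (PySem.List.enumerate s.2).foldl (fun result t =>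
                    let result := result ++ t.2
                    if t.1 < (s.2.length : Int) - 1 then result ++ PySem.List.pyGetD D 4 "" else result) result
                if s.1 < (r.2.length : Int) - 1 then result ++ PySem.List.pyGetD D 3 "" else result) result
            if r.1 < (q.2.length : Int) - 1 then result ++ PySem.List.pyGetD D 2 "" else result) result
        if q.1 < (page.length : Int) - 1 then result ++ PySem.List.pyGetD D 1 "" else result) acc
      = acc ++ PySem.Str.join (PySem.List.pyGetD D 1 "")
          (page.map (fun block => PySem.Str.join (PySem.List.pyGetD D 2 "")
            (block.map (fun para => PySem.Str.join (PySem.List.pyGetD D 3 "")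
              (para.map (fun line => PySem.Str.join (PySem.List.pyGetD D 4 "") (line.map id))))))) :=
    fun acc page => loopA_eq _ _ (fun r block => h2 r block) _ page 0 acc page.length (by simp)
  have h0 := loopA_eq _ _ (fun r page => h1 r page) (PySem.List.pyGetD D 0 "") L 0 "" L.length (by simp)
  unfold format_pytessaract_obj
  rw [h0]
  unfold format_pytessaract_obj_alt
  simp [joinLevel_eq, String.empty_append, List.map_id]

-- ===== VERDICT (by name: the statement is the Claim_ definition above) =====
theorem format_pytessaract_obj_spec : Claim_equal_format_pytessaract_obj := by
  intro L D _ _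
  unfold Spec_format_pytessaract_obj
  exact ports_agree L D
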